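-- pv_equiv track=rewrite | github.com/rajamohan1950/ExecSearchAgentSuchi | services/linkedin-parser/app/parser/section_parsers/experience.py | _split_company_location
-- ===== SOURCE A (Python) =====
-- def _split_company_location(text: str) -> tuple[str, str | None]:
--     """Split 'AlphaForge.ai, Bengaluru, India' into company and location."""
--     if not text:
--         return ("", None)
--
--     parts = [p.strip() for p in text.split(",")]
--
--     if len(parts) >= 3:
--         company = parts[0]
--         location = ", ".join(parts[1:])
--         return (company, location)
--     elif len(parts) == 2:
--         company = parts[0]
--         location = parts[1]
--         return (company, location)
--     else:
--         return (text, None)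
-- ===== SOURCE B (Python) =====
-- def _split_company_location(text: str) -> tuple[str, str | None]:
--     """Split 'AlphaForge.ai, Bengaluru, India' into company and location."""
--     # One-pass character state machine: tokens are built already stripped
--     # (leading whitespace skipped, interior whitespace buffered until the
--     # next non-space, so trailing whitespace is never committed).
--     toks = []           # finished stripped tokens (one per comma seen)
--     cur = []            # chars of the current token, stripped so far
--     pend = []           # whitespace seen inside the current token, not yet committed
--     started = False     # has the current token seen a non-space char?
--     for ch in text:
--         if ch == ",":
--             toks.append("".join(cur))
--             cur, pend, started = [], [], False
--         elif ch.isspace():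
--             if started:
--                 pend.append(ch)
--         else:
--             if started:
--                 cur.extend(pend)
--             pend = []
--             cur.append(ch)
--             started = True
--     if not toks:                      # no comma at all: original text unchanged
--         return (text, None)
--     toks.append("".join(cur))
--     return (toks[0], ", ".join(toks[1:]))
-- ===== Notes on version B (the rewrite author's own statement) =====
-- stated objective: alternative
-- what changed: Replaces split-all/strip-each/dispatch-on-length with a single left-to-right character state machine (current-token, pending-whitespace buffer, started flag) that builds the already-stripped tokens online in one pass, with no split(), strip() or partition() calls.
import Mathlib
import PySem

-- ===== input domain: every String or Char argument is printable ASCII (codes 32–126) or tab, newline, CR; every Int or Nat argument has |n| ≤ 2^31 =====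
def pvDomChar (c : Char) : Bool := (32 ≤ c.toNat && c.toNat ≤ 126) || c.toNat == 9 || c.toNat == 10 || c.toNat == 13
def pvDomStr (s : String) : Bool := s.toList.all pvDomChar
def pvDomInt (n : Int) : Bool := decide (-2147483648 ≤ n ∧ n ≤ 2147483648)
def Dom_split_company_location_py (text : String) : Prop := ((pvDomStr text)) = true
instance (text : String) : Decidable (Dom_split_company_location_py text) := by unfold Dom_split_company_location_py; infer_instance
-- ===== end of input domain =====

-- B replaces A's split/strip-each/length-dispatch by a one-pass character state
-- machine that builds already-stripped tokens online: same values, different algorithm.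


-- ===== PORT A =====
def split_company_location_py (text : String) : String × Option String :=
  if text = "" then ("", none)
  else
    let parts : List (List Char) :=
      (PySem.Chars.splitOn text.toList [',']).map PySem.Chars.strip
    if 3 ≤ parts.length then
      (String.ofList (PySem.List.pyGetD parts 0 []),
       some (String.ofList (PySem.Chars.join [',', ' '] (PySem.List.slice parts (some 1) none))))
    else if parts.length = 2 then
      (String.ofList (PySem.List.pyGetD parts 0 []),
       some (String.ofList (PySem.List.pyGetD parts 1 [])))
    else (text, none)

-- ===== PORT B =====
-- State of Source B's loop: (toks, cur, pend, started).
def bstep (st : List (List Char) × List Char × List Char × Bool) (ch : Char) :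
    List (List Char) × List Char × List Char × Bool :=
  let (toks, cur, pend, started) := st
  if ch = ',' then (toks ++ [cur], [], [], false)
  else if PySem.Chars.isspace ch then
    (if started then (toks, cur, pend ++ [ch], started) else (toks, cur, pend, started))
  else (toks, (if started then cur ++ pend else cur) ++ [ch], [], true)

def split_company_location_py_alt (text : String) : String × Option String :=
  let st := text.toList.foldl bstep ([], [], [], false)
  let toks := st.1
  let cur := st.2.1
  if toks.isEmpty then (text, none)
  else
    let toksAll := toks ++ [cur]
    (String.ofList (PySem.List.pyGetD toksAll 0 []),
     some (String.ofList (PySem.Chars.join [',', ' '] (PySem.List.slice toksAll (some 1) none))))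

-- ===== PRECONDITION & SPEC =====
def Spec_split_company_location_py (text : String) (out : String × Option String) : Prop := out = split_company_location_py_alt text
instance (text : String) (out : String × Option String) : Decidable (Spec_split_company_location_py text out) := by unfold Spec_split_company_location_py; infer_instance

-- ===== CLAIM (what is proved, stated in full; the proofs are below) =====
def Claim_equal_split_company_location_py : Prop := ∀ (text : String), Dom_split_company_location_py text → Spec_split_company_location_py text (split_company_location_py text)

-- ===== LEMMAS AND PROOFS =====

/-- Prepend a prefix onto the first piece of a split. -/
def consHead (p : List Char) : List (List Char) → List (List Char)
  | [] => [p]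
  | h :: t => (p ++ h) :: t

/-- Reference single-char comma split, by plain structural recursion. -/
def mySplit : List Char → List (List Char)
  | [] => [[]]
  | c :: rest => if c = ',' then [] :: mySplit rest else consHead [c] (mySplit rest)

theorem mySplit_ne_nil (l : List Char) : mySplit l ≠ [] := by
  cases l with
  | nil => simp [mySplit]
  | cons c rest =>
    simp only [mySplit]
    split
    · simp
    · cases h : mySplit rest <;> simp [consHead]

theorem consHead_nil_of_ne (xs : List (List Char)) (h : xs ≠ []) : consHead [] xs = xs := by
  cases xs with
  | nil => exact absurd rfl h
  | cons a t => simp [consHead]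

theorem consHead_consHead (p q : List Char) (xs : List (List Char)) :
    consHead p (consHead q xs) = consHead (p ++ q) xs := by
  cases xs <;> simp [consHead]

theorem go_comma (fuel : Nat) :
    ∀ (l cur : List Char) (acc : List (List Char)), l.length < fuel →
      PySem.Chars.splitOn.go [','] fuel l cur acc
        = acc.reverse ++ consHead cur.reverse (mySplit l) := by
  induction fuel with
  | zero => intro l cur acc h; omega
  | succ fuel ih =>
    intro l cur acc h
    cases l with
    | nil => simp [PySem.Chars.splitOn.go, mySplit, consHead]
    | cons c rest =>
      rw [PySem.Chars.splitOn.go]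
      by_cases hc : c = ','
      · subst hc
        simp only [List.isPrefixOf, Bool.and_true, beq_self_eq_true, if_pos]
        have hd : List.drop [','].length (',' :: rest) = rest := rfl
        rw [hd, ih rest [] ((cur.reverse :: acc))
            (by simpa using Nat.lt_of_succ_lt_succ h)]
        simp only [List.reverse_nil]
        rw [consHead_nil_of_ne _ (mySplit_ne_nil rest)]
        simp [mySplit, consHead]
      · have hpre : List.isPrefixOf [','] (c :: rest) = false := by
          simp [List.isPrefixOf]
          intro hne; exact hc hne.symm
        simp only [hpre, Bool.false_eq_true, if_false]
        rw [ih rest (c :: cur) acc (by simpa using Nat.lt_of_succ_lt_succ h)]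
        simp [mySplit, hc, consHead_consHead]

theorem splitOn_comma (s : List Char) :
    PySem.Chars.splitOn s [','] = mySplit s := by
  unfold PySem.Chars.splitOn
  rw [go_comma (s.length + 1) s [] [] (Nat.lt_succ_self _)]
  simp [consHead_nil_of_ne _ (mySplit_ne_nil s)]

/-- What Source B's inner transitions do to one (comma-free in use, but total) segment. -/
def emit : List Char → List Char → List Char → Bool → List Char
  | [], cur, _, _ => cur
  | ch :: t, cur, pend, started =>
    if PySem.Chars.isspace ch then
      (if started then emit t cur (pend ++ [ch]) started else emit t cur pend started)
    else emit t ((if started then cur ++ pend else cur) ++ [ch]) [] true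

theorem rstrip_all_space (l : List Char) (h : ∀ c ∈ l, PySem.Chars.isspace c = true) :
    PySem.Chars.rstrip l = [] := by
  unfold PySem.Chars.rstrip
  have : List.dropWhile PySem.Chars.isspace l.reverse = [] := by
    apply List.dropWhile_eq_nil_iff.mpr
    intro x hx; exact h x (List.mem_reverse.mp hx)
  simp [this]

theorem rstrip_append_nonspace (a : List Char) (c : Char) (t : List Char)
    (hc : PySem.Chars.isspace c = false) :
    PySem.Chars.rstrip (a ++ c :: t) = a ++ c :: PySem.Chars.rstrip t := by
  unfold PySem.Chars.rstrip
  rw [List.reverse_append, List.reverse_cons, List.append_assoc]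
  rw [List.dropWhile_append]
  by_cases hr : List.dropWhile PySem.Chars.isspace t.reverse = []
  · simp [hr, hc]
  · simp [hr]

theorem emit_started (s : List Char) :
    ∀ (cur pend : List Char), (∀ c ∈ pend, PySem.Chars.isspace c = true) →
      emit s cur pend true = cur ++ PySem.Chars.rstrip (pend ++ s) := by
  induction s with
  | nil =>
    intro cur pend hp
    simp [emit, rstrip_all_space pend hp]
  | cons ch t ih =>
    intro cur pend hp
    by_cases hs : PySem.Chars.isspace ch = true
    · have hp' : ∀ c ∈ pend ++ [ch], PySem.Chars.isspace c = true := by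
        intro c hc
        rcases List.mem_append.mp hc with h1 | h1
        · exact hp c h1
        · simp at h1; subst h1; exact hs
      simp only [emit, hs, if_true]
      rw [ih cur (pend ++ [ch]) hp']
      simp
    · have hs' : PySem.Chars.isspace ch = false := Bool.eq_false_iff.mpr hs
      simp only [emit, hs', Bool.false_eq_true, if_false, if_pos]
      rw [ih (cur ++ pend ++ [ch]) [] (by simp)]
      rw [rstrip_append_nonspace pend ch t hs']
      simp

theorem emit_false (s : List Char) :
    ∀ (cur : List Char), emit s cur [] false = cur ++ PySem.Chars.strip s := by
  induction s with
  | nil => intro cur; simp [emit, PySem.Chars.strip, PySem.Chars.lstrip, PySem.Chars.rstrip]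
  | cons ch t ih =>
    intro cur
    by_cases hs : PySem.Chars.isspace ch = true
    · simp only [emit, hs, if_true, if_neg (by simp : ¬ (false = true))]
      rw [ih cur]
      have : PySem.Chars.strip (ch :: t) = PySem.Chars.strip t := by
        unfold PySem.Chars.strip PySem.Chars.lstrip
        simp [List.dropWhile, hs]
      rw [this]
    · have hs' : PySem.Chars.isspace ch = false := Bool.eq_false_iff.mpr hs
      simp only [emit, hs', Bool.false_eq_true, if_false]
      rw [emit_started t (cur ++ [ch]) [] (by simp)]
      have : PySem.Chars.strip (ch :: t) = ch :: PySem.Chars.rstrip t := by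
        unfold PySem.Chars.strip PySem.Chars.lstrip
        rw [List.dropWhile]
        simp only [hs']
        have := rstrip_append_nonspace [] ch t hs'
        simpa using this
      simp [this]

/-- Main loop invariant: Source B's fold produces per-segment tokens of the comma split. -/
theorem fold_run (s : List Char) :
    ∀ (toks : List (List Char)) (cur pend : List Char) (started : Bool),
      (∀ c ∈ pend, PySem.Chars.isspace c = true) →
      (List.foldl bstep (toks, cur, pend, started) s).1
        ++ [(List.foldl bstep (toks, cur, pend, started) s).2.1]
      = toks ++ emit (mySplit s).headI cur pend started
          :: ((mySplit s).tail).map PySem.Chars.strip := by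
  induction s with
  | nil => intro toks cur pend started hp; simp [mySplit, emit]
  | cons ch t ih =>
    intro toks cur pend started hp
    by_cases hc : ch = ','
    · subst hc
      have hb : bstep (toks, cur, pend, started) ',' = (toks ++ [cur], [], [], false) := by
        simp [bstep]
      simp only [List.foldl_cons, hb]
      rw [ih (toks ++ [cur]) [] [] false (by simp)]
      obtain ⟨h, tl, hmt⟩ : ∃ h tl, mySplit t = h :: tl := by
        cases hmt : mySplit t with
        | nil => exact absurd hmt (mySplit_ne_nil t)
        | cons h tl => exact ⟨h, tl, rfl⟩
      simp [mySplit, hmt, emit, emit_false]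
    · obtain ⟨h, tl, hmt⟩ : ∃ h tl, mySplit t = h :: tl := by
        cases hmt : mySplit t with
        | nil => exact absurd hmt (mySplit_ne_nil t)
        | cons h tl => exact ⟨h, tl, rfl⟩
      have hsplit : mySplit (ch :: t) = (ch :: h) :: tl := by
        simp [mySplit, hc, hmt, consHead]
      by_cases hs : PySem.Chars.isspace ch = true
      · cases started with
        | true =>
          simp only [List.foldl_cons, bstep, if_neg hc, hs, if_true]
          rw [ih toks cur (pend ++ [ch]) true (by
            intro c hcc
            rcases List.mem_append.mp hcc with h1 | h1
            · exact hp c h1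
            · simp at h1; subst h1; exact hs)]
          simp [hsplit, hmt, emit, hs]
        | false =>
          simp only [List.foldl_cons, bstep, if_neg hc, hs, if_true, Bool.false_eq_true, if_false]
          rw [ih toks cur pend false hp]
          simp [hsplit, hmt, emit, hs]
      · have hs' : PySem.Chars.isspace ch = false := Bool.eq_false_iff.mpr hs
        simp only [List.foldl_cons, bstep, if_neg hc, hs', Bool.false_eq_true, if_false]
        rw [ih toks ((if started then cur ++ pend else cur) ++ [ch]) [] true (by simp)]
        simp [hsplit, hmt, emit, hs']

/-- Source B's token list is exactly A's stripped comma split. -/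
theorem fold_tokens (s : List Char) :
    (List.foldl bstep ([], [], [], false) s).1
      ++ [(List.foldl bstep ([], [], [], false) s).2.1]
    = (mySplit s).map PySem.Chars.strip := by
  rw [fold_run s [] [] [] false (by simp)]
  obtain ⟨h, tl, hmt⟩ : ∃ h tl, mySplit s = h :: tl := by
    cases hmt : mySplit s with
    | nil => exact absurd hmt (mySplit_ne_nil s)
    | cons h tl => exact ⟨h, tl, rfl⟩
  simp [hmt, emit_false]

-- main proof
theorem split_eq (text : String) :
    split_company_location_py text = split_company_location_py_alt text := by
  have hft := fold_tokens text.toList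
  unfold split_company_location_py split_company_location_py_alt
  cases hP : (mySplit text.toList).map PySem.Chars.strip with
  | nil =>
    exact absurd (List.map_eq_nil_iff.mp hP) (mySplit_ne_nil text.toList)
  | cons p0 rest =>
    rw [hP] at hft
    cases rest with
    | nil =>
      -- no comma: one segment
      have hlen : (List.foldl bstep ([], [], [], false) text.toList).1 = [] := by
        have := congrArg List.length hft
        simp at this
        exact this
      simp only [hlen, List.isEmpty_nil, if_true]
      by_cases htext : text = ""
      · subst htext; simp
      · rw [if_neg htext]
        have hparts : ((PySem.Chars.splitOn text.toList [',']).map PySem.Chars.strip) = [p0] := by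
          rw [splitOn_comma, hP]
        simp [hparts]
    | cons p1 rs =>
      have htoks : (List.foldl bstep ([], [], [], false) text.toList).1 ≠ [] := by
        intro h
        rw [h] at hft
        have := congrArg List.length hft
        simp at this
      have hisE : (List.foldl bstep ([], [], [], false) text.toList).1.isEmpty = false := by
        cases hE : (List.foldl bstep ([], [], [], false) text.toList).1 with
        | nil => exact absurd hE htoks
        | cons a b => simp
      have htext : ¬ text = "" := by
        intro h
        rw [h] at hP
        simp [mySplit] at hP
      have hparts : ((PySem.Chars.splitOn text.toList [',']).map PySem.Chars.strip)
          = p0 :: p1 :: rs := by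
        rw [splitOn_comma, hP]
      simp only [hisE, Bool.false_eq_true, if_false, if_neg htext, hparts, hft]
      cases rs with
      | nil =>
        have hsl : PySem.List.slice [p0, p1] (some 1) none = [p1] := by
          simp [PySem.List.slice, PySem.List.clampIdx]
        rw [if_neg (by simp), if_pos (by simp), hsl, PySem.Chars.join_singleton]
        simp [PySem.List.pyGetD, PySem.List.pyGet?, PySem.List.pyIdx?]
      | cons r rt =>
        have h3 : 3 ≤ (p0 :: p1 :: r :: rt).length := by simp
        rw [if_pos h3]

-- ===== VERDICT (by name: the statement is the Claim_ definition above) =====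
theorem split_company_location_py_spec : Claim_equal_split_company_location_py := by
  intro text _
  unfold Spec_split_company_location_py
  exact split_eq text
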